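-- pv_equiv track=rewrite | github.com/MatthiasLienhard/isotools | src/isotools/_gene_plots.py | genome_pos_to_gene_segments
-- ===== SOURCE A (Python) =====
-- def genome_pos_to_gene_segments(pos, genome_map, strict=True):
--     pos = sorted(set(pos))
--     offset = 0
--     reverse_strand = genome_map[0][0] > genome_map[-1][1]
--     if reverse_strand:
--         genome_map = [(seg[1], seg[0]) for seg in reversed(genome_map)]
--     mapped_pos = []
--     i = 0
--     for seg in genome_map:
--         while seg[1] >= pos[i]:
--             if seg[0] <= pos[i]:
--                 mapped_pos.append(offset+pos[i]-seg[0])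
--             elif not strict:
--                 mapped_pos.append(offset)
--             else:
--                 mapped_pos.append(None)
--             i += 1
--             if i == len(pos):
--                 break
--         else:
--             offset += seg[1]-seg[0]
--             continue
--         break
--     else:
--         for i in range(i, len(pos)):
--             mapped_pos.append(None if strict else offset)
--     if reverse_strand:
--         trlen = sum(seg[1]-seg[0] for seg in genome_map)
--         mapped_pos = [trlen-mp if mp is not None else None for mp in mapped_pos]
--     return {p: mp for p, mp in zip(pos, mapped_pos)}
-- ===== SOURCE B (Python) =====
-- def genome_pos_to_gene_segments(pos, genome_map, strict=True):
--     reverse_strand = genome_map[0][0] > genome_map[-1][1]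
--     segs = [(b, a) for a, b in reversed(genome_map)] if reverse_strand else list(genome_map)
--     trlen = sum(e - s for s, e in segs)
--
--     def map_one(p):
--         offset = 0
--         for s, e in segs:
--             if e >= p:
--                 if s <= p:
--                     mp = offset + p - s
--                 elif strict:
--                     return None
--                 else:
--                     mp = offset
--                 break
--             offset += e - s
--         else:
--             if strict:
--                 return None
--             mp = offset
--         return trlen - mp if reverse_strand else mp
--
--     return {p: map_one(p) for p in sorted(set(pos))}
-- ===== Notes on version B (the rewrite author's own statement) =====
-- stated objective: simpler
-- what changed: A interleaves one pass over segments with an inner while over the sorted positions (a coupled two-pointer loop with for/else and break bookkeeping); B maps each position independently with a small self-contained per-position segment scan, so there is no shared pointer or loop-exit flag state.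
import Mathlib
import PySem

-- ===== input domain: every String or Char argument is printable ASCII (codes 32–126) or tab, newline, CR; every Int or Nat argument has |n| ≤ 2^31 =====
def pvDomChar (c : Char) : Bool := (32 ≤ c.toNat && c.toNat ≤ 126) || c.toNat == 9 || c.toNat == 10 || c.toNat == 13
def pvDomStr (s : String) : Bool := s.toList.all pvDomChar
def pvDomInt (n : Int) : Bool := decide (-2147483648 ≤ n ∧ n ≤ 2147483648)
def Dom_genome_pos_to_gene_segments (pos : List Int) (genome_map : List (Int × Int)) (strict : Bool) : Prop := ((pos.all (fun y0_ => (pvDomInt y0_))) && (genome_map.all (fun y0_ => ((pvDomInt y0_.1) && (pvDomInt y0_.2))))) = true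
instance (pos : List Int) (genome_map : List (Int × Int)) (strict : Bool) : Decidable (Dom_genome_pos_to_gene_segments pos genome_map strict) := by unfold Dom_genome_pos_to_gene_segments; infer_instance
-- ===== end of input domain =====

-- B replaces A's coupled two-pointer loop (segment pass + inner while over sorted positions,
-- with for/else and break bookkeeping) by an independent per-position segment scan: simpler, same values.

-- ===== PORT A =====
-- the inner 'while seg[1] >= pos[i]: …' loop; returns (i, mapped_pos, broke-out-of-for?).
-- The 'none' branch of pos[i]? is Python's IndexError read pos[i]: under Pre_ it is never taken
-- (i stays < len(pos) whenever the while condition is evaluated); it only makes the port total.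
def pvAwhile (s e : Int) (pos : List Int) (strict : Bool) (offset : Int) (i : Nat) (acc : List (Option Int)) : Nat × List (Option Int) × Bool :=
  match h : pos[i]? with
  | none => (i, acc, false)
  | some p =>
    if e ≥ p then
      let acc' := acc ++ [if s ≤ p then some (offset + p - s) else if strict then none else some offset]
      if i + 1 = pos.length then (i + 1, acc', true)
      else pvAwhile s e pos strict offset (i + 1) acc'
    else (i, acc, false)
termination_by pos.length - i
decreasing_by
  obtain ⟨hlt, -⟩ := List.getElem?_eq_some_iff.mp h
  omega

-- the outer 'for seg in genome_map: … else: for i in range(i, len(pos)): …' loop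
def pvAloop (segs : List (Int × Int)) (pos : List Int) (strict : Bool) (i : Nat) (offset : Int) (acc : List (Option Int)) : List (Option Int) :=
  match segs with
  | [] => acc ++ List.replicate (pos.length - i) (if strict then none else some offset)
  | (s, e) :: rest =>
    let r := pvAwhile s e pos strict offset i acc
    if r.2.2 then r.2.1
    else pvAloop rest pos strict r.1 (offset + e - s) r.2.1

def genome_pos_to_gene_segments (pos : List Int) (genome_map : List (Int × Int)) (strict : Bool) : List (Int × Option Int) :=
  let pos' := PySem.List.sorted (PySem.Set.ofList pos) (fun x => x) false
  -- genome_map[0] / genome_map[-1]: Pre_ excludes empty genome_map (Python raises IndexError); .getD only totalizes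
  let first := (PySem.List.pyGet? genome_map 0).getD (0, 0)
  let last := (PySem.List.pyGet? genome_map (-1)).getD (0, 0)
  let rev := first.1 > last.2
  let gm := if rev then genome_map.reverse.map (fun seg => (seg.2, seg.1)) else genome_map
  let mapped := pvAloop gm pos' strict 0 0 []
  let mapped := if rev then
      let trlen := (gm.map (fun seg => seg.2 - seg.1)).sum
      mapped.map (fun mp => mp.map (fun v => trlen - v))
    else mapped
  pos'.zip mapped

-- ===== PORT B =====
-- B's per-position 'for s, e in segs: …' scan with its running offset (the for/else collapsed into
-- the base case); the reverse-strand transform is applied by map_one itself.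
def pvMapCore (strict : Bool) (p : Int) : List (Int × Int) → Int → Option Int
  | [], offset => if strict then none else some offset
  | (s, e) :: rest, offset =>
    if e ≥ p then
      if s ≤ p then some (offset + p - s)
      else if strict then none else some offset
    else pvMapCore strict p rest (offset + e - s)

def genome_pos_to_gene_segments_alt (pos : List Int) (genome_map : List (Int × Int)) (strict : Bool) : List (Int × Option Int) :=
  let first := (PySem.List.pyGet? genome_map 0).getD (0, 0)
  let last := (PySem.List.pyGet? genome_map (-1)).getD (0, 0)
  let rev := first.1 > last.2
  let segs := if rev then genome_map.reverse.map (fun seg => (seg.2, seg.1)) else genome_map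
  let trlen := (segs.map (fun seg => seg.2 - seg.1)).sum
  (PySem.List.sorted (PySem.Set.ofList pos) (fun x => x) false).map
    (fun p => (p, (pvMapCore strict p segs 0).map (fun mp => if rev then trlen - mp else mp)))

-- ===== PRECONDITION & SPEC =====
-- Python A raises IndexError when genome_map is empty (genome_map[0]) or when pos is empty (pos[0]
-- inside the while condition); Pre_ excludes exactly those inputs.
def Pre_genome_pos_to_gene_segments (pos : List Int) (genome_map : List (Int × Int)) (strict : Bool) : Prop :=
  pos ≠ [] ∧ genome_map ≠ []
instance (pos : List Int) (genome_map : List (Int × Int)) (strict : Bool) : Decidable (Pre_genome_pos_to_gene_segments pos genome_map strict) := by unfold Pre_genome_pos_to_gene_segments; infer_instance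

def pvWitness_genome_pos_to_gene_segments : List Int × (List (Int × Int)) × Bool := ([3, 7, 12], [(1, 5), (10, 14)], true)


def Spec_genome_pos_to_gene_segments (pos : List Int) (genome_map : List (Int × Int)) (strict : Bool) (out : List (Int × Option Int)) : Prop := out = genome_pos_to_gene_segments_alt pos genome_map strict
instance (pos : List Int) (genome_map : List (Int × Int)) (strict : Bool) (out : List (Int × Option Int)) : Decidable (Spec_genome_pos_to_gene_segments pos genome_map strict out) := by unfold Spec_genome_pos_to_gene_segments; infer_instance

-- ===== CLAIM (what is proved, stated in full; the proofs are below) =====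
def Claim_equal_genome_pos_to_gene_segments : Prop := ∀ (pos : List Int) (genome_map : List (Int × Int)) (strict : Bool), Dom_genome_pos_to_gene_segments pos genome_map strict → Pre_genome_pos_to_gene_segments pos genome_map strict → Spec_genome_pos_to_gene_segments pos genome_map strict (genome_pos_to_gene_segments pos genome_map strict)


-- ===== LEMMAS AND PROOFS =====

theorem pvMain (pos : List Int) (hs : pos.Pairwise (· ≤ ·)) :
    ∀ (segs : List (Int × Int)) (strict : Bool) (offset : Int) (i : Nat) (acc : List (Option Int)), i ≤ pos.length →
      pvAloop segs pos strict i offset acc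
        = acc ++ (pos.drop i).map (fun p => pvMapCore strict p segs offset) := by
  intro segs
  induction segs with
  | nil =>
    intro strict offset i acc hi
    simp [pvAloop, pvMapCore, List.map_const']
  | cons se rest ih =>
    obtain ⟨s, e⟩ := se
    intro strict offset i₀ acc₀ hi₀
    suffices H : ∀ n i acc, i ≤ pos.length → pos.length - i ≤ n →
        pvAloop ((s, e) :: rest) pos strict i offset acc
          = acc ++ (pos.drop i).map (fun p => pvMapCore strict p ((s, e) :: rest) offset) from
      H (pos.length - i₀) i₀ acc₀ hi₀ le_rfl
    intro n
    induction n with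
    | zero =>
      intro i acc hi hn
      have hie : i = pos.length := by omega
      subst hie
      rw [pvAloop, pvAwhile, List.getElem?_eq_none (le_refl pos.length)]
      simp [ih strict (offset + e - s) pos.length acc le_rfl]
    | succ n ih2 =>
      intro i acc hi hn
      cases h : pos[i]? with
      | none =>
        have hie : i = pos.length := by
          have := List.getElem?_eq_none_iff.mp h; omega
        subst hie
        rw [pvAloop, pvAwhile, h]
        simp [ih strict (offset + e - s) pos.length acc le_rfl]
      | some p =>
        obtain ⟨hlt, hget⟩ := List.getElem?_eq_some_iff.mp h
        have hdrop : pos.drop i = p :: pos.drop (i + 1) := by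
          rw [List.drop_eq_getElem_cons hlt, hget]
        by_cases hep : e ≥ p
        · set v : Option Int := if s ≤ p then some (offset + p - s) else if strict then none else some offset with hv
          have hcore : pvMapCore strict p ((s, e) :: rest) offset = v := by
            simp [pvMapCore, hep, hv]
          by_cases hbr : i + 1 = pos.length
          · rw [pvAloop, pvAwhile, h]
            simp only [hep, if_pos, hbr]
            rw [hdrop]
            have hnil : pos.drop (i + 1) = [] := by simp [hbr]
            simp [hnil, hcore]
            exact hv.symm
          · have hunf : pvAloop ((s, e) :: rest) pos strict i offset acc
                = pvAloop ((s, e) :: rest) pos strict (i + 1) offset (acc ++ [v]) := by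
              conv_lhs => rw [pvAloop, pvAwhile, h]
              conv_rhs => rw [pvAloop]
              simp [hep, hbr, hv]
            rw [hunf, ih2 (i + 1) (acc ++ [v]) (by omega) (by omega), hdrop]
            simp [hcore]
        · rw [pvAloop, pvAwhile, h]
          simp only [hep, ite_false, Bool.false_eq_true]
          rw [ih strict (offset + e - s) i acc hi]
          congr 1
          have hpw : (pos.drop i).Pairwise (· ≤ ·) := hs.drop
          rw [hdrop] at hpw
          have hq : ∀ q ∈ pos.drop (i + 1), p ≤ q := (List.pairwise_cons.mp hpw).1
          apply List.map_congr_left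
          intro q hq'
          have hpq : p ≤ q := by
            rw [hdrop] at hq'
            rcases List.mem_cons.mp hq' with rfl | hq2
            · exact le_refl _
            · exact hq _ hq2
          have hne : ¬ e ≥ q := by omega
          simp [pvMapCore, hne]

theorem pvZip (l : List Int) (g : Int → Option Int) : l.zip (l.map g) = l.map (fun p => (p, g p)) := by
  simpa using (List.zip_map' (f := @id Int) (g := g) (l := l))

-- ===== VERDICT (by name: the statement is the Claim_ definition above) =====
theorem genome_pos_to_gene_segments_spec : Claim_equal_genome_pos_to_gene_segments := by
  unfold Claim_equal_genome_pos_to_gene_segments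
  intro pos gm strict _dom _pre
  unfold Spec_genome_pos_to_gene_segments genome_pos_to_gene_segments genome_pos_to_gene_segments_alt
  dsimp only
  have hpw : (PySem.List.sorted (PySem.Set.ofList pos) (fun x => x) false).Pairwise (· ≤ ·) := by
    simpa using PySem.List.sorted_pairwise (PySem.Set.ofList pos) (fun x => x)
  set pos' := PySem.List.sorted (PySem.Set.ofList pos) (fun x => x) false with hpos'
  rw [pvMain pos' hpw _ strict 0 0 [] (Nat.zero_le _)]
  simp only [List.drop_zero, List.nil_append]
  by_cases hr : ((PySem.List.pyGet? gm 0).getD (0,0)).1 > ((PySem.List.pyGet? gm (-1)).getD (0,0)).2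
  · simp only [hr, ite_true]
    rw [List.map_map, pvZip]
    apply List.map_congr_left
    intro p _
    simp
  · simp only [hr, ite_false]
    rw [pvZip]
    apply List.map_congr_left
    intro p _
    simp
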